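-- pv_equiv track=rewrite | github.com/AnhquanNguyenn/PythonPracticeScripts | Witness of The Tall People/witness.py | witnesses
-- ===== SOURCE A (Python) =====
-- def witnesses(heights):
--     i = 0
--     count = 0
--     length = len(heights)
--     for height in heights:
--         if (i == (length - 1) or (height > heights[i + 1])):
--             count += 1
--         i += 1
--     return count
-- ===== SOURCE B (Python) =====
-- def witnesses(heights):
--     # The witnesses are exactly the last elements of the maximal
--     # non-decreasing runs of the list, so the answer is the number of runs.
--     runs = []
--     for h in heights:
--         if runs and runs[-1][-1] <= h:
--             runs[-1].append(h)
--         else: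
--             runs.append([h])
--     return len(runs)
-- ===== Notes on version B (the rewrite author's own statement) =====
-- stated objective: alternative
-- what changed: B recharacterizes the result as the number of maximal non-decreasing runs: it partitions the list into runs (a list of lists, extending the last run or starting a new one) and returns the run count, with no index, no successor lookup and no last-element branch.
import Mathlib
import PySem

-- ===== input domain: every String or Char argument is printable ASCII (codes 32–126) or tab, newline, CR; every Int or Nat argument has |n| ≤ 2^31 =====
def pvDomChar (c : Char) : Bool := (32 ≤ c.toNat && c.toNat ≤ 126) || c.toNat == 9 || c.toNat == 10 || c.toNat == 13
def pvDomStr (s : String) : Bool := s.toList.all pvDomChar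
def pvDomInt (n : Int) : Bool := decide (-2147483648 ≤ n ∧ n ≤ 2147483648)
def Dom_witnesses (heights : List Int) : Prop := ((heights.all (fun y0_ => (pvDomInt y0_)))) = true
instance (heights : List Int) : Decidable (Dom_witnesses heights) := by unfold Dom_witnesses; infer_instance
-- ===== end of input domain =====

-- B recharacterizes the result as the number of maximal non-decreasing runs of the list,
-- built as an explicit run partition (objective: alternative).

-- ===== PORT A =====
-- one loop iteration of A: state = (i, count)
def witnessesStep (full : List Int) (st : Int × Int) (height : Int) : Int × Int :=
  if st.1 == (full.length : Int) - 1 ||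
      (match PySem.List.pyGet? full (st.1 + 1) with
       | some nxt => decide (height > nxt)
       | none => false) then
    (st.1 + 1, st.2 + 1)
  else
    (st.1 + 1, st.2)

def witnesses (heights : List Int) : Int :=
  (heights.foldl (witnessesStep heights) (0, 0)).2

-- ===== PORT B =====
-- one loop iteration of B: extend the last run or start a new one
def altStep (runs : List (List Int)) (h : Int) : List (List Int) :=
  match runs.getLast? with
  | some r =>
    match r.getLast? with
    | some x => if x ≤ h then runs.dropLast ++ [r ++ [h]] else runs ++ [[h]]
    | none => runs ++ [[h]]   -- unreachable: runs never contains an empty run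
  | none => [[h]]

def witnesses_alt (heights : List Int) : Int :=
  ((heights.foldl altStep []).length : Int)

-- ===== PRECONDITION & SPEC =====
def Spec_witnesses (heights : List Int) (out : Int) : Prop := out = witnesses_alt heights
instance (heights : List Int) (out : Int) : Decidable (Spec_witnesses heights out) := by unfold Spec_witnesses; infer_instance

-- ===== CLAIM (what is proved, stated in full; the proofs are below) =====
def Claim_equal_witnesses : Prop := ∀ (heights : List Int), Dom_witnesses heights → Spec_witnesses heights (witnesses heights)

-- ===== LEMMAS AND PROOFS =====

-- reference value: 1 for each element greater than its successor, plus 1 for the last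
def pvG : List Int → Int
  | [] => 0
  | [_] => 1
  | a :: b :: t => (if a > b then 1 else 0) + pvG (b :: t)

-- descents of l relative to preceding element p
def dcount (p : Int) : List Int → Int
  | [] => 0
  | h :: t => (if p > h then 1 else 0) + dcount h t

theorem loopA (rest : List Int) : ∀ (pre : List Int) (count : Int),
    (List.foldl (witnessesStep (pre ++ rest)) ((pre.length : Int), count) rest).2
      = count + pvG rest := by
  induction rest with
  | nil => intro pre count; simp [pvG]
  | cons a rest' ih =>
    intro pre count
    cases rest' with
    | nil =>
      simp [witnessesStep, pvG]
    | cons b t =>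
      have hfull : pre ++ a :: b :: t = (pre ++ [a]) ++ (b :: t) := by simp
      have hstep : witnessesStep (pre ++ a :: b :: t) ((pre.length : Int), count) a
          = ((pre.length : Int) + 1, count + (if a > b then 1 else 0)) := by
        have hget : PySem.List.pyGet? (pre ++ a :: b :: t) ((pre.length : Int) + 1)
            = some b := by
          rw [hfull]
          have : ((pre.length : Int) + 1) = (((pre ++ [a]).length : Nat) : Int) := by
            simp
          rw [this, PySem.List.pyGet?_append_length]
        simp only [witnessesStep, hget]
        by_cases hab : a > b <;> simp [hab] <;> omega
      have hcast : (pre.length : Int) + 1 = (((pre ++ [a]).length : Nat) : Int) := by simp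
      calc (List.foldl (witnessesStep (pre ++ a :: b :: t)) ((pre.length : Int), count) (a :: b :: t)).2
          = (List.foldl (witnessesStep ((pre ++ [a]) ++ (b :: t)))
              ((((pre ++ [a]).length : Nat) : Int), count + (if a > b then 1 else 0)) (b :: t)).2 := by
            rw [List.foldl_cons, hstep, hcast, hfull]
        _ = count + (if a > b then 1 else 0) + pvG (b :: t) := ih (pre ++ [a]) _
        _ = count + pvG (a :: b :: t) := by simp [pvG]; ring

theorem witnesses_eq_pvG (heights : List Int) : witnesses heights = pvG heights := by
  have := loopA heights [] 0
  simpa [witnesses] using this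

theorem pvG_cons (a : Int) (t : List Int) : pvG (a :: t) = 1 + dcount a t := by
  induction t generalizing a with
  | nil => simp [pvG, dcount]
  | cons b t ih => simp [pvG, dcount, ih b]; ring

theorem altStep_concat (rs : List (List Int)) (r : List Int) (p h : Int)
    (hp : r.getLast? = some p) :
    altStep (rs ++ [r]) h =
      if p > h then (rs ++ [r]) ++ [[h]] else rs ++ [r ++ [h]] := by
  simp only [altStep, List.getLast?_concat, hp, List.dropLast_concat]
  by_cases hph : p > h
  · have : ¬ p ≤ h := by omega
    simp [hph, this]
  · have : p ≤ h := by omega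
    simp [hph, this]

theorem loopB (l : List Int) : ∀ (rs : List (List Int)) (r : List Int) (p : Int),
    r.getLast? = some p →
    ((List.foldl altStep (rs ++ [r]) l).length : Int)
      = (rs.length : Int) + 1 + dcount p l := by
  induction l with
  | nil => intro rs r p _; simp [dcount]
  | cons h t ih =>
    intro rs r p hp
    rw [List.foldl_cons, altStep_concat rs r p h hp]
    by_cases hph : p > h
    · rw [if_pos hph, ih (rs ++ [r]) [h] h rfl]
      simp [dcount, hph]
      ring
    · have := ih rs (r ++ [h]) h (by simp)
      simp [hph, this, dcount]

theorem witnesses_alt_eq_pvG (heights : List Int) : witnesses_alt heights = pvG heights := by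
  cases heights with
  | nil => simp [witnesses_alt, pvG]
  | cons a t =>
    have h0 : altStep [] a = [] ++ [[a]] := by simp [altStep]
    have := loopB t [] [a] a rfl
    simp only [witnesses_alt, List.foldl_cons, h0]
    rw [this, pvG_cons]
    simp

-- ===== VERDICT (by name: the statement is the Claim_ definition above) =====
theorem witnesses_spec : Claim_equal_witnesses := by
  intro heights _
  unfold Spec_witnesses
  rw [witnesses_eq_pvG, witnesses_alt_eq_pvG]
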